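-- pv_equiv track=rewrite | github.com/drellem2/lineara | scripts/build_chic_v11.py | _find_match_position
-- ===== SOURCE A (Python) =====
-- def _find_match_position(
--     tokens: list[str], match_signs: list[str],
-- ) -> tuple[int, int] | None:
--     """Find the (start, end) token-index window where `match_signs`
--     matches a contiguous run of CHIC sign tokens (clean or uncertain).
--
--     Match is on raw sign id (`#NNN`), tolerating the `[?:#NNN]` uncertain
--     form. Returns (start_idx, end_idx) inclusive, or None.
--     """
--     def _normalize(tok: str) -> str | None:
--         if tok.startswith("#"):
--             return tok
--         if tok.startswith("[?:#") and tok.endswith("]"):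
--             return tok[3:-1]
--         return None
--
--     norm = [_normalize(t) for t in tokens]
--     L = len(match_signs)
--     for i in range(0, len(tokens) - L + 1):
--         if all(norm[i + k] == match_signs[k] for k in range(L)):
--             return i, i + L - 1
--     return None
-- ===== SOURCE B (Python) =====
-- def _find_match_position(
--     tokens: list[str], match_signs: list[str],
-- ):
--     """KMP search: find the first (start, end) token-index window where
--     `match_signs` matches a contiguous run of sign tokens."""
--     def _normalize(tok):
--         if tok.startswith("#"):
--             return tok
--         if tok.startswith("[?:#") and tok.endswith("]"):
--             return tok[3:-1]
--         return None
--
--     L = len(match_signs)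
--     if L == 0:
--         return 0, -1
--
--     def _shift(f, k, c):
--         # follow failure links until the pattern can extend (or is empty)
--         while k > 0 and match_signs[k] != c:
--             k = f[k - 1]
--         return k + 1 if match_signs[k] == c else 0
--
--     f = [0] * L
--     k = 0
--     for j in range(1, L):
--         k = _shift(f, k, match_signs[j])
--         f[j] = k
--
--     j = 0
--     for i, tok in enumerate(tokens):
--         j = _shift(f, j, _normalize(tok))
--         if j == L:
--             return i - L + 1, i
--     return None
-- ===== Notes on version B (the rewrite author's own statement) =====
-- stated objective: alternative
-- what changed: Replaces A's naive sliding-window scan (re-checking up to L tokens at each of the n start positions) with Knuth-Morris-Pratt: a failure table built from the pattern plus a single left-to-right scan of the normalized tokens.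
import Mathlib
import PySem

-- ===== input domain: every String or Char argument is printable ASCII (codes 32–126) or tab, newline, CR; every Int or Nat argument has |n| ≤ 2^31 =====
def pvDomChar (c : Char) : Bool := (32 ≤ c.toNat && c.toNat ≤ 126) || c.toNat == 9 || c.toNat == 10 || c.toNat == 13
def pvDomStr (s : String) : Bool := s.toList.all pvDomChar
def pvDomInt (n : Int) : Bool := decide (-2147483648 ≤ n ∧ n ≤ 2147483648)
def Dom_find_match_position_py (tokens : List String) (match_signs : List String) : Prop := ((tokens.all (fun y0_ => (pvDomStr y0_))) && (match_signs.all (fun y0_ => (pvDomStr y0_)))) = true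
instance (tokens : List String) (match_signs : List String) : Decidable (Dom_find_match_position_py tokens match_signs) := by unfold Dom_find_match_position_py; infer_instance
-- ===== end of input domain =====

-- B replaces A's naive sliding-window re-scanning by Knuth-Morris-Pratt matching (a failure
-- table built from the pattern, then one left-to-right scan of the normalized tokens); both
-- return the first matching window as (start, end) — here some [start, end].

-- the `_normalize` helper, identical in both Pythons (A and B contain the same local function)
def pvNormalize (tok : String) : Option String :=
  if PySem.Str.startswith tok "#" then some tok
  else if PySem.Str.startswith tok "[?:#" && PySem.Str.endswith tok "]" then
    some (PySem.Str.slice tok (some 3) (some (-1)))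
  else none

-- ===== PORT A =====
-- `norm = [_normalize(t) for t in tokens]`, then `for i in range(0, len(tokens)-L+1):
--   if all(norm[i+k] == match_signs[k] for k in range(L)): return i, i+L-1` / `return None`.
-- Python's early-returning `for` over `range` is the first `i` of the range passing the test
-- (`List.find?`); `norm[i+k] == match_signs[k]` compares Optional[str] with str, i.e. equality
-- in `Option String` after wrapping the str in `some`.
def find_match_position_py (tokens : List String) (match_signs : List String) : Option (List Int) :=
  let norm := tokens.map pvNormalize
  let L : Int := (match_signs.length : Int)
  match (PySem.List.pyRange 0 ((tokens.length : Int) - L + 1) 1).find?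
      (fun i => (PySem.List.pyRange 0 L 1).all
        (fun k => PySem.List.pyGetD norm (i + k) none == some (PySem.List.pyGetD match_signs k ""))) with
  | some i => some [i, i + L - 1]
  | none => none

-- ===== PORT B =====
-- transliteration of Source B (KMP).  `_shift`'s `while` loop is ported with fuel k+1: each pass
-- strictly decreases k (failure links go down), so the fuel never runs out.
def pvShiftAux (p : List (Option String)) (F : List Nat) (c : Option String) :
    Nat → Nat → Nat
  | 0, k => k
  | fuel + 1, k =>
    if k ≠ 0 ∧ p[k]? ≠ some c then pvShiftAux p F c fuel (F.getD (k - 1) 0)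
    else if p[k]? = some c then k + 1 else 0

-- `_shift(f, k, c)`: follow failure links, then extend by one or restart at 0
def pvShift (p : List (Option String)) (F : List Nat) (k : Nat) (c : Option String) : Nat :=
  pvShiftAux p F c (k + 1) k

-- `f = [0]*L; k = 0; for j in range(1, L): k = _shift(f, k, match_signs[j]); f[j] = k`
def pvBuild (p : List (Option String)) : List Nat :=
  ((List.range' 1 (p.length - 1)).foldl
    (fun (st : List Nat × Nat) j =>
      let k := pvShift p st.1 st.2 (p.getD j none)
      (st.1.set j k, k))
    (List.replicate p.length 0, 0)).1

-- `for i, tok in enumerate(tokens): j = _shift(f, j, _normalize(tok)); if j == L: return i-L+1, i`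
def pvScan (p : List (Option String)) (F : List Nat) :
    List String → Nat → Nat → Option (List Int)
  | [], _, _ => none
  | tok :: rest, i, j =>
    let j' := pvShift p F j (pvNormalize tok)
    if j' = p.length then some [(i : Int) - (p.length : Int) + 1, (i : Int)]
    else pvScan p F rest (i + 1) j'

def find_match_position_py_alt (tokens : List String) (match_signs : List String) : Option (List Int) :=
  if match_signs.length = 0 then some [0, -1]
  else
    let p := match_signs.map (fun s => some s)
    pvScan p (pvBuild p) tokens 0 0

-- ===== PRECONDITION & SPEC =====
def Spec_find_match_position_py (tokens : List String) (match_signs : List String) (out : Option (List Int)) : Prop := out = find_match_position_py_alt tokens match_signs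
instance (tokens : List String) (match_signs : List String) (out : Option (List Int)) : Decidable (Spec_find_match_position_py tokens match_signs out) := by unfold Spec_find_match_position_py; infer_instance

-- ===== CLAIM (what is proved, stated in full; the proofs are below) =====
def Claim_equal_find_match_position_py : Prop := ∀ (tokens : List String) (match_signs : List String), Dom_find_match_position_py tokens match_signs → Spec_find_match_position_py tokens match_signs (find_match_position_py tokens match_signs)

-- ===== LEMMAS AND PROOFS =====

-- `pvCand p u b`: the length-b prefix of the pattern p is a suffix of the processed text,
-- where u is the processed text REVERSED (so "suffix" becomes "prefix of u").
def pvCand (p u : List (Option String)) (b : Nat) : Prop :=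
  b ≤ p.length ∧ (p.take b).reverse <+: u

-- `pvBest p u j`: j is the longest such prefix (the KMP automaton state after reading u).
def pvBest (p u : List (Option String)) (j : Nat) : Prop :=
  pvCand p u j ∧ ∀ b, pvCand p u b → b ≤ j

-- reversed text the failure table is about: `pu p j` = reverse of (p.drop 1).take j
def pvPu (p : List (Option String)) (j : Nat) : List (Option String) :=
  ((p.drop 1).take j).reverse

-- the failure table is correct up to (strictly below) index m
def pvFok (p : List (Option String)) (F : List Nat) (m : Nat) : Prop :=
  ∀ jj, jj < m → pvBest p (pvPu p jj) (F.getD jj 0)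

-- naive first-occurrence search (reference point both ports are reduced to)
def pvOccB (t p : List (Option String)) (s : Nat) : Bool :=
  decide (∀ k < p.length, t[s + k]? = p[k]?)

def pvNaive (t p : List (Option String)) : Option Nat :=
  (List.range (t.length + 1 - p.length)).find? (pvOccB t p)

lemma pvCand_zero (p u : List (Option String)) : pvCand p u 0 := by
  exact ⟨Nat.zero_le _, by simp⟩

lemma pvCand_le_len {p u : List (Option String)} {b : Nat} (h : pvCand p u b) : b ≤ u.length := by
  rcases h with ⟨hbL, hpre⟩
  have := hpre.length_le
  simpa [List.length_take, Nat.min_eq_left hbL] using this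

lemma pvCand_succ_cons {p u : List (Option String)} {c : Option String} {b : Nat} :
    pvCand p (c :: u) (b + 1) ↔ (b < p.length ∧ p[b]? = some c ∧ pvCand p u b) := by
  constructor
  · rintro ⟨hbL, hpre⟩
    have hb : b < p.length := hbL
    have : p.take (b + 1) = p.take b ++ [p[b]] := by
      rw [List.take_add_one, List.getElem?_eq_getElem hb]; rfl
    rw [this, List.reverse_append] at hpre
    simp only [List.reverse_singleton, List.singleton_append] at hpre
    rw [List.cons_prefix_cons] at hpre
    exact ⟨hb, by simp [List.getElem?_eq_getElem hb, hpre.1], ⟨Nat.le_of_lt hb, hpre.2⟩⟩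
  · rintro ⟨hb, hget, ⟨hbL, hpre⟩⟩
    refine ⟨hb, ?_⟩
    have : p.take (b + 1) = p.take b ++ [p[b]] := by
      rw [List.take_add_one, List.getElem?_eq_getElem hb]; rfl
    rw [this, List.reverse_append]
    simp only [List.reverse_singleton, List.singleton_append]
    rw [List.cons_prefix_cons]
    have : p[b] = c := by simpa [List.getElem?_eq_getElem hb] using hget
    exact ⟨this, hpre⟩

-- a candidate for u that is shorter than another candidate j is a candidate for rev(p.take j)
lemma pvCand_of_le {p u : List (Option String)} {b j : Nat}
    (hb : pvCand p u b) (hj : pvCand p u j) (hle : b ≤ j) :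
    pvCand p ((p.take j).reverse) b := by
  refine ⟨hb.1, ?_⟩
  exact List.prefix_of_prefix_length_le hb.2 hj.2
    (by simp [List.length_take, Nat.min_eq_left hb.1, Nat.min_eq_left hj.1, hle])

-- candidates of rev(p.take (j+1)) of length ≤ j are exactly candidates of pvPu p j
lemma pvCand_take_succ_iff {p : List (Option String)} {j b : Nat} (hjL : j < p.length) :
    (pvCand p ((p.take (j + 1)).reverse) b ∧ b ≤ j) ↔ pvCand p (pvPu p j) b := by
  have hrev : ((p.take (j + 1)).reverse).take j = pvPu p j := by
    rw [pvPu, List.take_reverse, List.length_take, Nat.min_eq_left hjL]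
    have h1 : j + 1 - j = 1 := by omega
    rw [h1, List.drop_take]
    norm_num
  constructor
  · rintro ⟨⟨hbL, hpre⟩, hbj⟩
    refine ⟨hbL, ?_⟩
    rw [← hrev]
    rw [List.prefix_take_iff]
    exact ⟨hpre, by simp [List.length_take, Nat.min_eq_left hbL, hbj]⟩
  · rintro ⟨hbL, hpre⟩
    rw [← hrev, List.prefix_take_iff] at hpre
    refine ⟨⟨hbL, hpre.1⟩, ?_⟩
    have := hpre.2
    simpa [List.length_take, Nat.min_eq_left hbL] using this

-- ===== the master lemma: `_shift` moves the automaton to the best state =====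
lemma pvShiftAux_spec (p : List (Option String)) (F : List Nat) (c : Option String) :
    ∀ fuel j (u : List (Option String)), j < fuel → j < p.length → pvFok p F j → pvCand p u j →
      (∀ b, 1 ≤ b → pvCand p (c :: u) b → b ≤ j + 1) →
      pvBest p (c :: u) (pvShiftAux p F c fuel j) := by
  intro fuel
  induction fuel with
  | zero => intro j u h; omega
  | succ fuel ih =>
    intro j u hfuel hjL hF hcand hmax
    rw [pvShiftAux]
    by_cases hcond : j ≠ 0 ∧ p[j]? ≠ some c
    · rw [if_pos hcond]
      obtain ⟨hj0, hne⟩ := hcond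
      have hjm : j - 1 < j := by omega
      have hFbest : pvBest p (pvPu p (j - 1)) (F.getD (j - 1) 0) := hF (j - 1) hjm
      set j₁ := F.getD (j - 1) 0 with hj₁
      have hj₁len : j₁ ≤ j - 1 := by
        have := pvCand_le_len hFbest.1
        simp only [pvPu, List.length_reverse, List.length_take] at this
        omega
      have hj1L : j - 1 < p.length := by omega
      -- rev (p.take j) is a prefix of u, via hcand
      have hjj : j - 1 + 1 = j := by omega
      have hcj₁ : pvCand p ((p.take j).reverse) j₁ := by
        have h := (pvCand_take_succ_iff hj1L).mpr hFbest.1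
        rw [hjj] at h
        exact h.1
      have hcand₁ : pvCand p u j₁ := ⟨hcj₁.1, hcj₁.2.trans hcand.2⟩
      have hmax₁ : ∀ b, 1 ≤ b → pvCand p (c :: u) b → b ≤ j₁ + 1 := by
        intro b hb1 hbc
        have hble : b ≤ j + 1 := hmax b hb1 hbc
        have hbj : b ≤ j := by
          rcases Nat.lt_or_ge b (j + 1) with h | h
          · omega
          · exfalso
            have hbeq : b = j + 1 := by omega
            subst hbeq
            have := (pvCand_succ_cons.mp hbc).2.1
            exact hne this
        -- b = (b-1)+1 with p[b-1] = c and pvCand p u (b-1)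
        have hb' : b - 1 + 1 = b := by omega
        have hbc' : pvCand p (c :: u) (b - 1 + 1) := by rwa [hb']
        obtain ⟨hblt, hbget, hbu⟩ := pvCand_succ_cons.mp hbc'
        have h1 : pvCand p ((p.take j).reverse) (b - 1) :=
          pvCand_of_le hbu hcand (by omega)
        have h2 : pvCand p (pvPu p (j - 1)) (b - 1) := by
          refine (pvCand_take_succ_iff hj1L).mp ?_
          rw [hjj]
          exact ⟨h1, by omega⟩
        have := hFbest.2 _ h2
        omega
      exact ih j₁ u (by omega) (by omega) (fun jj hjj' => hF jj (by omega)) hcand₁ hmax₁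
    · rw [if_neg hcond]
      push Not at hcond
      by_cases hc : p[j]? = some c
      · rw [if_pos hc]
        constructor
        · exact pvCand_succ_cons.mpr ⟨hjL, hc, hcand⟩
        · intro b hb
          rcases Nat.eq_zero_or_pos b with h0 | h1
          · omega
          · exact hmax b h1 hb
      · rw [if_neg hc]
        have hj0 : j = 0 := by
          by_contra h
          exact hc (hcond h)
        subst hj0
        constructor
        · exact pvCand_zero p (c :: u)
        · intro b hb
          rcases Nat.eq_zero_or_pos b with h0 | h1
          · omega
          · exfalso
            have hble : b ≤ 1 := hmax b h1 hb
            have hbeq : b = 1 := by omega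
            subst hbeq
            have := (pvCand_succ_cons.mp hb).2.1
            exact hc this

lemma pvShift_spec {p u : List (Option String)} {F : List Nat} {j : Nat} {c : Option String}
    (hjL : j < p.length) (hF : pvFok p F j) (hbest : pvBest p u j) :
    pvBest p (c :: u) (pvShift p F j c) := by
  refine pvShiftAux_spec p F c (j + 1) j u (by omega) hjL hF hbest.1 ?_
  intro b hb1 hbc
  have hb' : b - 1 + 1 = b := by omega
  have hbc' : pvCand p (c :: u) (b - 1 + 1) := by rwa [hb']
  obtain ⟨_, _, hbu⟩ := pvCand_succ_cons.mp hbc'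
  have := hbest.2 _ hbu
  omega

lemma pvCand_nil {p : List (Option String)} {b : Nat} (h : pvCand p [] b) : b = 0 := by
  have := pvCand_le_len h
  simpa using this

lemma pvBest_nil (p : List (Option String)) : pvBest p [] 0 :=
  ⟨pvCand_zero p [], fun _ hb => Nat.le_of_eq (pvCand_nil hb)⟩

-- ===== failure-table correctness =====
lemma pvBuild_inv (p : List (Option String)) (hL : 0 < p.length) :
    ∀ m, m ≤ p.length - 1 →
      (((List.range' 1 m).foldl
        (fun (st : List Nat × Nat) j =>
          let k := pvShift p st.1 st.2 (p.getD j none)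
          (st.1.set j k, k))
        (List.replicate p.length 0, 0)).1.length = p.length) ∧
      pvBest p (pvPu p m)
        (((List.range' 1 m).foldl
          (fun (st : List Nat × Nat) j =>
            let k := pvShift p st.1 st.2 (p.getD j none)
            (st.1.set j k, k))
          (List.replicate p.length 0, 0)).2) ∧
      (∀ jj, jj ≤ m → pvBest p (pvPu p jj)
        (((List.range' 1 m).foldl
          (fun (st : List Nat × Nat) j =>
            let k := pvShift p st.1 st.2 (p.getD j none)
            (st.1.set j k, k))
          (List.replicate p.length 0, 0)).1.getD jj 0)) := by
  intro m
  induction m with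
  | zero =>
    intro _
    refine ⟨by simp, ?_, ?_⟩
    · simpa [pvPu] using pvBest_nil p
    · intro jj hjj
      have h0 : jj = 0 := by omega
      subst h0
      simp only [List.range'_zero, List.foldl_nil]
      rw [List.getD_replicate _ hL]
      simpa [pvPu] using pvBest_nil p
  | succ m ih =>
    intro hm1
    have hmle : m ≤ p.length - 1 := by omega
    obtain ⟨hlen, hbest2, hall⟩ := ih hmle
    have hms : 1 + 1 * m = m + 1 := by omega
    rw [List.range'_concat, hms, List.foldl_append, List.foldl_cons, List.foldl_nil]
    set st := ((List.range' 1 m).foldl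
      (fun (st : List Nat × Nat) j =>
        let k := pvShift p st.1 st.2 (p.getD j none)
        (st.1.set j k, k))
      (List.replicate p.length 0, 0)) with hst
    have hm1L : m + 1 < p.length := by omega
    have hc : p.getD (m + 1) none = p[m + 1] := by
      rw [List.getD_eq_getElem?_getD, List.getElem?_eq_getElem hm1L]
      rfl
    have h1 : (p.drop 1)[m]? = some p[m + 1] := by
      rw [List.getElem?_drop]
      have h2 : 1 + m = m + 1 := by omega
      rw [h2]
      exact List.getElem?_eq_getElem hm1L
    have hpu : pvPu p (m + 1) = p[m + 1] :: pvPu p m := by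
      rw [pvPu, List.take_add_one, h1, pvPu]
      simp
    have hstL : st.2 < p.length := by
      have h3 := pvCand_le_len hbest2.1
      simp only [pvPu, List.length_reverse, List.length_take] at h3
      omega
    have hFst : pvFok p st.1 st.2 := fun jj hjj' => hall jj (by
      have h3 := pvCand_le_len hbest2.1
      simp only [pvPu, List.length_reverse, List.length_take] at h3
      omega)
    have hk : pvBest p (pvPu p (m + 1)) (pvShift p st.1 st.2 (p.getD (m + 1) none)) := by
      rw [hc, hpu]
      exact pvShift_spec hstL hFst hbest2
    simp only
    refine ⟨by simp [hlen], hk, ?_⟩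
    intro jj hjj
    rcases Nat.lt_or_ge jj (m + 1) with hlt | hge
    · rw [List.getD_eq_getElem?_getD, List.getElem?_set_ne (by omega),
        ← List.getD_eq_getElem?_getD]
      exact hall jj (by omega)
    · have hje : jj = m + 1 := by omega
      subst hje
      rw [List.getD_eq_getElem?_getD, List.getElem?_set_self (by omega)]
      exact hk

lemma pvBuild_spec (p : List (Option String)) (hL : 0 < p.length) :
    pvFok p (pvBuild p) p.length := by
  intro jj hjj
  have h := (pvBuild_inv p hL (p.length - 1) (Nat.le_refl _)).2.2 jj (by omega)
  exact h

-- ===== occurrence bridge: automaton state L at end e ↔ naive match starting at e-L =====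
lemma pvOcc_bridge {t p : List (Option String)} {e : Nat} (he : e ≤ t.length) :
    pvCand p ((t.take e).reverse) p.length ↔
      p.length ≤ e ∧ pvOccB t p (e - p.length) = true := by
  have hlt : (t.take e).length = e := by
    simp [List.length_take, Nat.min_eq_left he]
  have hsuf : pvCand p ((t.take e).reverse) p.length ↔ p <:+ t.take e := by
    simp [pvCand, List.take_length, List.reverse_prefix]
  rw [hsuf]
  unfold pvOccB
  rw [decide_eq_true_eq]
  constructor
  · intro h
    have hLe : p.length ≤ e := by
      have := h.length_le
      omega
    refine ⟨hLe, ?_⟩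
    have hp : p = (t.take e).drop ((t.take e).length - p.length) :=
      List.suffix_iff_eq_drop.mp h
    rw [hlt] at hp
    intro k hk
    conv_rhs => rw [hp]
    rw [List.getElem?_drop, List.getElem?_take, if_pos (by omega)]
  · rintro ⟨hLe, hocc⟩
    rw [List.suffix_iff_eq_drop, hlt]
    refine List.ext_getElem? ?_
    intro k
    rw [List.getElem?_drop, List.getElem?_take]
    rcases Nat.lt_or_ge k p.length with hk | hk
    · rw [if_pos (by omega)]
      exact (hocc k hk).symm
    · rw [if_neg (by omega), List.getElem?_eq_none hk]

-- find? over range characterisation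
lemma find?_range_some {P : Nat → Bool} {N m : Nat}
    (hm : m < N) (hP : P m = true) (hmin : ∀ k < m, ¬ P k = true) :
    (List.range N).find? P = some m := by
  induction N with
  | zero => omega
  | succ N ih =>
    rw [List.range_succ, List.find?_append]
    rcases Nat.lt_or_ge m N with h | h
    · rw [ih h]; rfl
    · have hmN : m = N := by omega
      subst hmN
      have : (List.range m).find? P = none := by
        rw [List.find?_eq_none]
        intro x hx
        exact hmin x (List.mem_range.mp hx)
      rw [this]
      simp [hP]

-- ===== the scan equals the naive search =====
lemma pvScan_spec (p : List (Option String))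
    (hF : pvFok p (pvBuild p) p.length) :
    ∀ (rest utoks : List String) (j : Nat) (tokens : List String),
      tokens = utoks ++ rest →
      pvBest p ((utoks.map pvNormalize).reverse) j → j < p.length →
      (∀ e, e ≤ utoks.length →
        ¬ pvCand p (((tokens.map pvNormalize).take e).reverse) p.length) →
      pvScan p (pvBuild p) rest utoks.length j =
        (pvNaive (tokens.map pvNormalize) p).map
          (fun s => [(s : Int), (s : Int) + (p.length : Int) - 1]) := by
  intro rest
  induction rest with
  | nil =>
    intro utoks j tokens htok hbest hjL hno
    have hul : tokens.length = utoks.length := by rw [htok]; simp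
    have hnil : pvNaive (tokens.map pvNormalize) p = none := by
      rw [pvNaive, List.find?_eq_none]
      intro s hs hocc
      have hsr : s < tokens.length + 1 - p.length := by
        have := List.mem_range.mp hs
        simpa using this
      have hse : s + p.length ≤ (tokens.map pvNormalize).length := by simp; omega
      have hcd : pvCand p (((tokens.map pvNormalize).take (s + p.length)).reverse) p.length := by
        refine (pvOcc_bridge hse).mpr ⟨by omega, ?_⟩
        simpa [Nat.add_sub_cancel] using hocc
      exact hno (s + p.length) (by simp at hse; omega) hcd
    rw [hnil]
    rfl
  | cons tok rest' ih =>
    intro utoks j tokens htok hbest hjL hno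
    have htlen : tokens.length = utoks.length + 1 + rest'.length := by
      rw [htok]; simp; omega
    simp only [pvScan]
    have hF' : pvFok p (pvBuild p) j := fun jj hjj => hF jj (by omega)
    have hbest' : pvBest p (pvNormalize tok :: (utoks.map pvNormalize).reverse)
        (pvShift p (pvBuild p) j (pvNormalize tok)) := pvShift_spec hjL hF' hbest
    have htake : (tokens.map pvNormalize).take (utoks.length + 1) =
        utoks.map pvNormalize ++ [pvNormalize tok] := by
      rw [htok]
      simp only [List.map_append, List.map_cons]
      rw [show utoks.length + 1 = (utoks.map pvNormalize).length + 1 by simp,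
        List.take_append]
      simp
    have hcu : pvNormalize tok :: (utoks.map pvNormalize).reverse =
        ((tokens.map pvNormalize).take (utoks.length + 1)).reverse := by
      rw [htake, List.reverse_append]
      simp
    by_cases hj' : pvShift p (pvBuild p) j (pvNormalize tok) = p.length
    · rw [if_pos hj']
      have he : utoks.length + 1 ≤ (tokens.map pvNormalize).length := by simp; omega
      have hcandL : pvCand p
          (((tokens.map pvNormalize).take (utoks.length + 1)).reverse) p.length := by
        rw [← hcu, ← hj']
        exact hbest'.1
      obtain ⟨hLe, hocc⟩ := (pvOcc_bridge he).mp hcandL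
      have hfind : pvNaive (tokens.map pvNormalize) p = some (utoks.length + 1 - p.length) := by
        rw [pvNaive]
        refine find?_range_some ?_ hocc ?_
        · simp; omega
        · intro k hk hocck
          have hke : k + p.length ≤ (tokens.map pvNormalize).length := by simp; omega
          have hcd : pvCand p (((tokens.map pvNormalize).take (k + p.length)).reverse)
              p.length := by
            refine (pvOcc_bridge hke).mpr ⟨by omega, ?_⟩
            simpa [Nat.add_sub_cancel] using hocck
          exact hno (k + p.length) (by omega) hcd
      rw [hfind]
      have h1 : ((utoks.length + 1 - p.length : Nat) : Int) =
          (utoks.length : Int) - (p.length : Int) + 1 := by omega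
      simp [h1]
      omega
    · rw [if_neg hj']
      have hj'L : pvShift p (pvBuild p) j (pvNormalize tok) < p.length := by
        have := hbest'.1.1
        omega
      have hno' : ∀ e, e ≤ (utoks ++ [tok]).length →
          ¬ pvCand p (((tokens.map pvNormalize).take e).reverse) p.length := by
        intro e hel hcd
        simp only [List.length_append, List.length_cons, List.length_nil] at hel
        rcases Nat.lt_or_ge e (utoks.length + 1) with hlt | hge
        · exact hno e (by omega) hcd
        · have hee : e = utoks.length + 1 := by omega
          subst hee
          rw [← hcu] at hcd
          have := hbest'.2 _ hcd
          omega
      have hres := ih (utoks ++ [tok])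
        (pvShift p (pvBuild p) j (pvNormalize tok)) tokens
        (by rw [htok]; simp) (by rw [List.map_append]; simpa using hbest') hj'L hno'
      simpa using hres

-- ===== the A port equals the naive search =====
lemma pvFind?_congr {b : Type} {l : List b} {f g : b → Bool}
    (h : ∀ x ∈ l, f x = g x) : l.find? f = l.find? g := by
  induction l with
  | nil => rfl
  | cons x xs ih =>
    rw [List.find?_cons, List.find?_cons, h x (by simp)]
    cases g x with
    | false => exact ih (fun y hy => h y (by simp [hy]))
    | true => rfl

lemma pvA_eq_naive (tokens match_signs : List String) :
    find_match_position_py tokens match_signs =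
      (pvNaive (tokens.map pvNormalize) (match_signs.map (fun s => some s))).map
        (fun s => [(s : Int), (s : Int) + (match_signs.length : Int) - 1]) := by
  unfold find_match_position_py
  simp only
  set t := tokens.map pvNormalize with ht
  set p := match_signs.map (fun s => some s) with hp
  have hLp : p.length = match_signs.length := by simp [hp]
  have htn : t.length = tokens.length := by simp [ht]
  have hb : ((tokens.length : Int) - (match_signs.length : Int) + 1 - 0).toNat =
      tokens.length + 1 - match_signs.length := by omega
  have hbL : ((match_signs.length : Int) - 0).toNat = match_signs.length := by omega
  rw [PySem.List.pyRange_one, hbL, PySem.List.pyRange_one, hb, List.find?_map]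
  have hpt : ∀ s ∈ List.range (tokens.length + 1 - match_signs.length),
      ((fun i => ((List.range match_signs.length).map (fun k : Nat => (0 : Int) + k)).all
        (fun k => PySem.List.pyGetD t (i + k) none ==
          some (PySem.List.pyGetD match_signs k ""))) ∘ (fun k : Nat => (0 : Int) + k)) s
      = pvOccB t p s := by
    intro s hs
    have hsn : s < tokens.length + 1 - match_signs.length := List.mem_range.mp hs
    simp only [Function.comp_apply]
    rw [List.all_map, Bool.eq_iff_iff, List.all_eq_true]
    unfold pvOccB
    rw [decide_eq_true_eq]
    have hterm : ∀ k : Nat, k < match_signs.length → s + k < t.length →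
        (((fun k : Int => PySem.List.pyGetD t ((0 : Int) + s + k) none ==
            some (PySem.List.pyGetD match_signs k "")) ((0 : Int) + k) = true) ↔
          t[s + k]? = p[k]?) := by
      intro k hk hsk
      simp only
      have e1 : (0 : Int) + s + (0 + k) = ((s + k : Nat) : Int) := by push_cast; ring
      have e2 : ((0 : Int) + k) = ((k : Nat) : Int) := by ring
      rw [e1, e2, PySem.List.pyGetD_natCast, PySem.List.pyGetD_natCast]
      rw [List.getD_eq_getElem?_getD, List.getElem?_eq_getElem hsk,
        List.getD_eq_getElem?_getD, List.getElem?_eq_getElem hk]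
      rw [hp, List.getElem?_map, List.getElem?_eq_getElem hk]
      simp
    constructor
    · intro h k hkL
      have hkm : k < match_signs.length := by omega
      have hskn : s + k < t.length := by omega
      have h2 := h k (List.mem_range.mpr hkm)
      simp only [Function.comp_apply] at h2
      exact (hterm k hkm hskn).mp h2
    · intro h k hk
      have hkL : k < match_signs.length := List.mem_range.mp hk
      have hskn : s + k < t.length := by omega
      simp only [Function.comp_apply]
      exact (hterm k hkL hskn).mpr (h k (by omega))
  rw [pvFind?_congr hpt]
  have hnv : (List.range (tokens.length + 1 - match_signs.length)).find? (pvOccB t p) =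
      pvNaive t p := by
    rw [pvNaive, htn, hLp]
  rw [hnv]
  cases hres : pvNaive t p with
  | none => rfl
  | some s => simp

-- ===== VERDICT (by name: the statement is the Claim_ definition above) =====
theorem find_match_position_py_spec : Claim_equal_find_match_position_py := by
  intro tokens match_signs _
  unfold Spec_find_match_position_py
  rw [pvA_eq_naive]
  unfold find_match_position_py_alt
  by_cases hL : match_signs.length = 0
  · rw [if_pos hL]
    have hms : match_signs = [] := List.length_eq_zero_iff.mp hL
    subst hms
    have h0 : pvNaive (tokens.map pvNormalize) ([] : List (Option String)) = some 0 := by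
      rw [pvNaive]
      refine find?_range_some (by simp) ?_ (by omega)
      unfold pvOccB
      simp
    simp only [List.map_nil]
    rw [h0]
    rfl
  · rw [if_neg hL]
    simp only
    have hp0 : 0 < (match_signs.map (fun s => some s)).length := by simp; omega
    have hF := pvBuild_spec (match_signs.map (fun s => some s)) hp0
    have hbest0 : pvBest (match_signs.map (fun s => some s))
        ((([] : List String).map pvNormalize).reverse) 0 := by
      simpa using pvBest_nil (match_signs.map (fun s => some s))
    have hno0 : ∀ e, e ≤ ([] : List String).length →
        ¬ pvCand (match_signs.map (fun s => some s))
          (((tokens.map pvNormalize).take e).reverse)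
          (match_signs.map (fun s => some s)).length := by
      intro e he hcd
      have he0 : e = 0 := by simpa using he
      subst he0
      rw [List.take_zero, List.reverse_nil] at hcd
      have := pvCand_le_len hcd
      simp only [List.length_nil, List.length_map, Nat.le_zero] at this
      omega
    have h := pvScan_spec (match_signs.map (fun s => some s)) hF tokens [] 0 tokens
      rfl hbest0 hp0 hno0
    simp only [List.length_nil] at h
    rw [h]
    simp
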